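-- pv_equiv track=rewrite | github.com/ferruano99/DAA | Examenes/14-15mayo.py | ej3
-- ===== SOURCE A (Python) =====
-- def ej3(v, min_e, i_f, f_f, i_c, f_c):
--     if i_c == f_c and i_f == f_f:
--         if v[i_f][i_c] < min_e:
--             min_e = v[i_f][i_c]
--     else:
--         if i_f < f_f:
--             if i_c < f_c:
--                 m_f = (i_f + f_f) // 2
--                 m_c = (i_c + f_c) // 2
--                 min_e = ej3(v, min_e, i_f, m_f, i_c, m_c)
--                 min_e = ej3(v, min_e, i_f, m_f, m_c + 1, f_c)
--
--                 min_e = ej3(v, min_e, m_f + 1, f_f, i_c, m_c)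
--                 min_e = ej3(v, min_e, m_f + 1, f_f, m_c + 1, f_c)
--             else:  # ic == fc
--                 m_f = (i_f + f_f) // 2
--                 min_e = ej3(v, min_e, i_f, m_f, i_c, f_c)
--                 min_e = ej3(v, min_e, m_f + 1, f_f, i_c, f_c)
--         else:  # if == ff
--             m_c = (i_c + f_c) // 2
--             min_e = ej3(v, min_e, i_f, f_f, i_c, m_c)
--             min_e = ej3(v, min_e, i_f, f_f, m_c + 1, f_c)
--     return min_e
-- ===== SOURCE B (Python) =====
-- def ej3(v, min_e, i_f, f_f, i_c, f_c):
--     return min(min_e, min(v[i][j]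
--                           for i in range(i_f, f_f + 1)
--                           for j in range(i_c, f_c + 1)))
-- ===== Notes on version B (the rewrite author's own statement) =====
-- stated objective: idiomatic
-- what changed: Replaces the four-way quadrant divide-and-conquer recursion with a single expression: min of min_e and min() over a generator enumerating every cell of the submatrix.
import Mathlib
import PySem

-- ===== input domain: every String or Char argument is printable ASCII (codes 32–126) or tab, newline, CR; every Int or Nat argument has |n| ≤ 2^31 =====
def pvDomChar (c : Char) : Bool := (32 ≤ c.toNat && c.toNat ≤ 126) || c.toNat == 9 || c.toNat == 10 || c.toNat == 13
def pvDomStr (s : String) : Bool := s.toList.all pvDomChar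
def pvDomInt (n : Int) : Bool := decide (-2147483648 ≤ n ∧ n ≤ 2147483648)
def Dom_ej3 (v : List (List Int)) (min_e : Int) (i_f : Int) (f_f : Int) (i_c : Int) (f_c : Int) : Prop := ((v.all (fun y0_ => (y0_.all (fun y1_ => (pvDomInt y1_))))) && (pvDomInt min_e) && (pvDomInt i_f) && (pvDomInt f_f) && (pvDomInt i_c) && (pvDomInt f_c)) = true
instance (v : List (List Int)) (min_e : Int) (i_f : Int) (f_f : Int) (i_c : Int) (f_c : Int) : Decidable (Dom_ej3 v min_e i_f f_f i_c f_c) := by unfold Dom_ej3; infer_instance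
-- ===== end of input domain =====

-- B replaces A's quadrant divide-and-conquer recursion by one idiomatic expression: the minimum
-- of min_e and min() over a generator enumerating every cell of the submatrix (objective: simpler).

-- ===== PORT A =====
-- v[i][j] with Python index semantics; total with defaults, used only under Pre_'s InRange bounds
def pyCell (v : List (List Int)) (i j : Int) : Int :=
  PySem.List.pyGetD (PySem.List.pyGetD v i []) j 0

-- Literal transliteration of A's recursion. On inverted ranges the Python recursion never
-- terminates (RecursionError, outside Pre_), so the port carries a fuel counter that only makes
-- the same computation total; ej3 supplies fuel that provably suffices on Pre_ inputs.
def ej3Fuel (fuel : Nat) (v : List (List Int)) (min_e : Int) (i_f f_f i_c f_c : Int) : Int :=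
  match fuel with
  | 0 => min_e
  | fuel + 1 =>
    if i_c = f_c ∧ i_f = f_f then
      if pyCell v i_f i_c < min_e then pyCell v i_f i_c else min_e
    else if i_f < f_f then
      if i_c < f_c then
        let m_f := PySem.Int.floordiv (i_f + f_f) 2
        let m_c := PySem.Int.floordiv (i_c + f_c) 2
        let min_e1 := ej3Fuel fuel v min_e i_f m_f i_c m_c
        let min_e2 := ej3Fuel fuel v min_e1 i_f m_f (m_c + 1) f_c
        let min_e3 := ej3Fuel fuel v min_e2 (m_f + 1) f_f i_c m_c
        ej3Fuel fuel v min_e3 (m_f + 1) f_f (m_c + 1) f_c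
      else
        let m_f := PySem.Int.floordiv (i_f + f_f) 2
        let min_e1 := ej3Fuel fuel v min_e i_f m_f i_c f_c
        ej3Fuel fuel v min_e1 (m_f + 1) f_f i_c f_c
    else
      let m_c := PySem.Int.floordiv (i_c + f_c) 2
      let min_e1 := ej3Fuel fuel v min_e i_f f_f i_c m_c
      ej3Fuel fuel v min_e1 i_f f_f (m_c + 1) f_c

def ej3 (v : List (List Int)) (min_e : Int) (i_f : Int) (f_f : Int) (i_c : Int) (f_c : Int) : Int :=
  ej3Fuel ((f_f - i_f).toNat + (f_c - i_c).toNat + 1) v min_e i_f f_f i_c f_c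

-- ===== PORT B =====
-- min(min_e, min(genexp)); Python's min() raises ValueError on an empty generator (none here),
-- which Pre_'s non-inverted-range condition excludes, so .getD's default is never the result
def ej3_alt (v : List (List Int)) (min_e : Int) (i_f : Int) (f_f : Int) (i_c : Int) (f_c : Int) : Int :=
  min min_e ((PySem.List.min? ((PySem.List.pyRange i_f (f_f + 1) 1).flatMap (fun i =>
    (PySem.List.pyRange i_c (f_c + 1) 1).map (fun j => pyCell v i j))) (fun x => x)).getD min_e)

-- ===== PRECONDITION & SPEC =====
-- Pre_ admits exactly the inputs where Python A returns: non-inverted ranges (else A's recursion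
-- never bottoms out: RecursionError) and every accessed index valid under Python indexing,
-- including negative wraparound (row validity of the whole range reduces to the two endpoints).
def Pre_ej3 (v : List (List Int)) (min_e : Int) (i_f : Int) (f_f : Int) (i_c : Int) (f_c : Int) : Prop :=
  i_f ≤ f_f ∧ i_c ≤ f_c ∧
  PySem.Raise.InRange v.length i_f ∧ PySem.Raise.InRange v.length f_f ∧
  ∀ i ∈ PySem.List.pyRange i_f (f_f + 1) 1,
    PySem.Raise.InRange (PySem.List.pyGetD v i []).length i_c ∧
    PySem.Raise.InRange (PySem.List.pyGetD v i []).length f_c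
instance (v : List (List Int)) (min_e : Int) (i_f : Int) (f_f : Int) (i_c : Int) (f_c : Int) : Decidable (Pre_ej3 v min_e i_f f_f i_c f_c) := by unfold Pre_ej3; infer_instance

def pvWitness_ej3 : List (List Int) × Int × Int × Int × Int × Int := ([[5, 2], [3, 4]], 10, 0, 1, 0, 1)

def Spec_ej3 (v : List (List Int)) (min_e : Int) (i_f : Int) (f_f : Int) (i_c : Int) (f_c : Int) (out : Int) : Prop := out = ej3_alt v min_e i_f f_f i_c f_c
instance (v : List (List Int)) (min_e : Int) (i_f : Int) (f_f : Int) (i_c : Int) (f_c : Int) (out : Int) : Decidable (Spec_ej3 v min_e i_f f_f i_c f_c out) := by unfold Spec_ej3; infer_instance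

-- ===== CLAIM (what is proved, stated in full; the proofs are below) =====
def Claim_equal_ej3 : Prop := ∀ (v : List (List Int)) (min_e : Int) (i_f : Int) (f_f : Int) (i_c : Int) (f_c : Int), Dom_ej3 v min_e i_f f_f i_c f_c → Pre_ej3 v min_e i_f f_f i_c f_c → Spec_ej3 v min_e i_f f_f i_c f_c (ej3 v min_e i_f f_f i_c f_c)

-- ===== LEMMAS AND PROOFS =====

-- all cells of the submatrix, row-major
def cells (v : List (List Int)) (i_f f_f i_c f_c : Int) : List Int :=
  (PySem.List.pyRange i_f (f_f + 1) 1).flatMap (fun i =>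
    (PySem.List.pyRange i_c (f_c + 1) 1).map (fun j => pyCell v i j))

theorem foldl_min_min (a : Int) : ∀ (l : List Int) (b : Int),
    l.foldl min (min a b) = min a (l.foldl min b) := by
  intro l
  induction l with
  | nil => intro b; rfl
  | cons x l ih =>
      intro b
      simp only [List.foldl_cons, min_assoc]
      exact ih (min b x)

theorem foldl_min_comm (l₁ : List Int) : ∀ (l₂ : List Int) (e : Int),
    l₂.foldl min (l₁.foldl min e) = l₁.foldl min (l₂.foldl min e) := by
  induction l₁ with
  | nil => intro l₂ e; rfl
  | cons x l₁ ih =>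
      intro l₂ e
      simp only [List.foldl_cons]
      rw [ih, min_comm e x, foldl_min_min, min_comm x]

theorem foldl_min_flatMap_split (L R : Int → List Int) :
    ∀ (rows : List Int) (e : Int),
      (rows.flatMap (fun i => L i ++ R i)).foldl min e
        = (rows.flatMap R).foldl min ((rows.flatMap L).foldl min e) := by
  intro rows
  induction rows with
  | nil => intro e; rfl
  | cons i rs ih =>
      intro e
      simp only [List.flatMap_cons, List.foldl_append]
      rw [ih]
      congr 1
      exact foldl_min_comm (R i) (List.flatMap L rs) _

theorem if_min (x r : Int) : (if x < r then x else r) = min r x := by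
  simp [min_def]; omega

theorem cells_ne_nil (v : List (List Int)) (i_f f_f i_c f_c : Int)
    (hr : i_f ≤ f_f) (hc : i_c ≤ f_c) : cells v i_f f_f i_c f_c ≠ [] := by
  unfold cells
  rw [PySem.List.pyRange_one_cons (by omega : i_f < f_f + 1),
    PySem.List.pyRange_one_cons (by omega : i_c < f_c + 1)]
  simp

theorem alt_eq_foldl_min (v : List (List Int)) (min_e i_f f_f i_c f_c : Int)
    (hr : i_f ≤ f_f) (hc : i_c ≤ f_c) :
    ej3_alt v min_e i_f f_f i_c f_c = (cells v i_f f_f i_c f_c).foldl min min_e := by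
  obtain ⟨x, xs, hx⟩ :=
    List.exists_cons_of_ne_nil (cells_ne_nil v i_f f_f i_c f_c hr hc)
  have halt : ej3_alt v min_e i_f f_f i_c f_c
      = min min_e ((PySem.List.min? (cells v i_f f_f i_c f_c) (fun x => x)).getD min_e) := rfl
  rw [halt, hx, PySem.List.min?_id_cons, Option.getD_some, List.foldl_cons, foldl_min_min]

theorem cells_row_split (v : List (List Int)) (i_f m f_f i_c f_c : Int)
    (h1 : i_f ≤ m) (h2 : m < f_f) :
    cells v i_f f_f i_c f_c = cells v i_f m i_c f_c ++ cells v (m + 1) f_f i_c f_c := by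
  unfold cells
  rw [PySem.List.pyRange_one_append i_f (m + 1) (f_f + 1) (by omega) (by omega),
    List.flatMap_append]

theorem cells_col_split_foldl (v : List (List Int)) (i_f f_f i_c m f_c e : Int)
    (h1 : i_c ≤ m) (h2 : m < f_c) :
    (cells v i_f f_f i_c f_c).foldl min e
      = (cells v i_f f_f (m + 1) f_c).foldl min ((cells v i_f f_f i_c m).foldl min e) := by
  unfold cells
  rw [PySem.List.pyRange_one_append i_c (m + 1) (f_c + 1) (by omega) (by omega)]
  simp only [List.map_append]
  exact foldl_min_flatMap_split _ _ _ e

theorem mid_bounds (a b : Int) (h : a < b) :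
    a ≤ PySem.Int.floordiv (a + b) 2 ∧ PySem.Int.floordiv (a + b) 2 < b := by
  rw [PySem.Int.floordiv_eq_ediv_of_pos (by omega)]
  omega

theorem ej3Fuel_correct : ∀ (fuel : Nat) (v : List (List Int)) (e i_f f_f i_c f_c : Int),
    i_f ≤ f_f → i_c ≤ f_c → (f_f - i_f).toNat + (f_c - i_c).toNat < fuel →
    ej3Fuel fuel v e i_f f_f i_c f_c = (cells v i_f f_f i_c f_c).foldl min e := by
  intro fuel
  induction fuel with
  | zero => intro _ _ _ _ _ _ _ _ h; omega
  | succ fuel ih =>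
      intro v e i_f f_f i_c f_c hr hc hfuel
      rw [ej3Fuel]
      by_cases hleaf : i_c = f_c ∧ i_f = f_f
      · obtain ⟨hc', hr'⟩ := hleaf
        subst hc' hr'
        simp only [and_self, if_true]
        unfold cells
        rw [PySem.List.pyRange_one_singleton, PySem.List.pyRange_one_singleton]
        simp [if_min]
      · rw [if_neg hleaf]
        by_cases hrow : i_f < f_f
        · rw [if_pos hrow]
          by_cases hcol : i_c < f_c
          · rw [if_pos hcol]
            obtain ⟨hmf1, hmf2⟩ := mid_bounds i_f f_f hrow
            obtain ⟨hmc1, hmc2⟩ := mid_bounds i_c f_c hcol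
            simp only
            rw [ih v e i_f _ i_c _ hmf1 hmc1 (by omega),
              ih v _ i_f _ _ f_c hmf1 (by omega) (by omega),
              ih v _ _ f_f i_c _ (by omega) hmc1 (by omega),
              ih v _ _ f_f _ f_c (by omega) (by omega) (by omega)]
            rw [cells_row_split v i_f (PySem.Int.floordiv (i_f + f_f) 2) f_f i_c f_c hmf1 hmf2,
              List.foldl_append,
              cells_col_split_foldl v i_f _ i_c (PySem.Int.floordiv (i_c + f_c) 2) f_c e hmc1 hmc2,
              cells_col_split_foldl v _ f_f i_c (PySem.Int.floordiv (i_c + f_c) 2) f_c _ hmc1 hmc2]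
          · rw [if_neg hcol]
            obtain ⟨hmf1, hmf2⟩ := mid_bounds i_f f_f hrow
            simp only
            rw [ih v e i_f _ i_c f_c hmf1 hc (by omega),
              ih v _ _ f_f i_c f_c (by omega) hc (by omega),
              cells_row_split v i_f (PySem.Int.floordiv (i_f + f_f) 2) f_f i_c f_c hmf1 hmf2,
              List.foldl_append]
        · rw [if_neg hrow]
          have hre : i_f = f_f := by omega
          have hcol : i_c < f_c := by
            rcases lt_or_eq_of_le hc with h | h
            · exact h
            · exact absurd ⟨h, hre⟩ hleaf
          obtain ⟨hmc1, hmc2⟩ := mid_bounds i_c f_c hcol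
          simp only
          rw [ih v e i_f f_f i_c _ hr hmc1 (by omega),
            ih v _ i_f f_f _ f_c hr (by omega) (by omega),
            cells_col_split_foldl v i_f f_f i_c (PySem.Int.floordiv (i_c + f_c) 2) f_c e hmc1 hmc2]

-- ===== VERDICT (by name: the statement is the Claim_ definition above) =====
theorem ej3_spec : Claim_equal_ej3 := by
  intro v min_e i_f f_f i_c f_c _ hpre
  unfold Spec_ej3
  obtain ⟨hr, hc, _⟩ := hpre
  rw [ej3, ej3Fuel_correct _ v min_e i_f f_f i_c f_c hr hc (by omega),
    alt_eq_foldl_min v min_e i_f f_f i_c f_c hr hc]
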